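-- pv_equiv track=rewrite | github.com/jurayev/algorithms-practice | amazon/redshift_task2.py | solution
-- ===== SOURCE A (Python) =====
-- def solution(ranks):
--     result = 0
--     soldiers = 0
--     sorted_ranks = sorted(ranks)
--     for i in range(len(sorted_ranks) - 1):
--         if sorted_ranks[i] == sorted_ranks[i+1] - 1:
--             result += 1 + soldiers
--             soldiers = 0
--         elif sorted_ranks[i] == sorted_ranks[i+1]:
--             soldiers += 1
--         else:
--             soldiers = 0
--     return result
-- ===== SOURCE B (Python) =====
-- def solution(ranks):
--     present = set(ranks)
--     return sum(1 for r in ranks if r + 1 in present)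
-- ===== Notes on version B (the rewrite author's own statement) =====
-- stated objective: faster
-- what changed: Replaced the sort-then-scan with duplicate carryover by a single membership pass: build set(ranks) once and count the elements r with r+1 present, which equals A's carried-over boundary sum.
import Mathlib
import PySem

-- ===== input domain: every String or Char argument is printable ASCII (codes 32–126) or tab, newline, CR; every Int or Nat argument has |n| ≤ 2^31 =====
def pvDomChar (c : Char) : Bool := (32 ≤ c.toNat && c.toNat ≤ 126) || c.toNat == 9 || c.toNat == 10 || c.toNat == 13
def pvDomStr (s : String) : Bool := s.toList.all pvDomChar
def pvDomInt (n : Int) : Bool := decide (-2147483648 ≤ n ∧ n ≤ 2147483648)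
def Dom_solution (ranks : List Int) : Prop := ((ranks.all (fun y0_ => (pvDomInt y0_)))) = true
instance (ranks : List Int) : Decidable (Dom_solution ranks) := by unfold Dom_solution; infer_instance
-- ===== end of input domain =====

-- B replaces A's sort-then-scan (with duplicate carryover) by one membership-counting pass over a set of the ranks.


-- ===== PORT A =====
-- the loop body of A: state (result, soldiers), current pair (sorted[i], sorted[i+1])
def solStep (st : Int × Int) (a b : Int) : Int × Int :=
  if a = b - 1 then (st.1 + 1 + st.2, 0)
  else if a = b then (st.1, st.2 + 1)
  else (st.1, 0)

def solution (ranks : List Int) : Int :=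
  let sorted_ranks := PySem.List.sorted ranks (fun x => x)
  -- indices are always in range here, so pyGetD is exact for sorted_ranks[i] / sorted_ranks[i+1]
  let st := (PySem.List.pyRange 0 ((sorted_ranks.length : Int) - 1)).foldl
    (fun st i => solStep st (PySem.List.pyGetD sorted_ranks i 0)
                            (PySem.List.pyGetD sorted_ranks (i + 1) 0)) (0, 0)
  st.1

-- ===== PORT B =====
def solution_alt (ranks : List Int) : Int :=
  let present := PySem.Set.ofList ranks
  (ranks.map (fun r => if PySem.Set.contains present (r + 1) then (1 : Int) else 0)).sum

-- ===== PRECONDITION & SPEC =====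
def Spec_solution (ranks : List Int) (out : Int) : Prop := out = solution_alt ranks
instance (ranks : List Int) (out : Int) : Decidable (Spec_solution ranks out) := by unfold Spec_solution; infer_instance

-- ===== CLAIM (what is proved, stated in full; the proofs are below) =====
def Claim_equal_solution : Prop := ∀ (ranks : List Int), Dom_solution ranks → Spec_solution ranks (solution ranks)

-- ===== LEMMAS AND PROOFS =====

-- A's index loop reads exactly the adjacent pairs of the sorted list.
lemma map_adjacent_pairs (l : List Int) :
    (List.range (l.length - 1)).map (fun k => (l.getD k 0, l.getD (k + 1) 0)) = l.zip l.tail := by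
  induction l with
  | nil => simp
  | cons x t ih =>
    cases t with
    | nil => simp
    | cons y t' =>
      have ih' := ih
      simp only [List.length_cons, Nat.add_sub_cancel] at ih' ⊢
      rw [List.range_succ_eq_map, List.map_cons, List.map_map]
      show _ :: _ = (x, y) :: (y :: t').zip t'
      congr 1

lemma fold_pyRange_eq_fold_zip (l : List Int) (init : Int × Int) :
    (PySem.List.pyRange 0 ((l.length : Int) - 1)).foldl
      (fun st i => solStep st (PySem.List.pyGetD l i 0) (PySem.List.pyGetD l (i + 1) 0)) init
    = (l.zip l.tail).foldl (fun st p => solStep st p.1 p.2) init := by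
  rw [PySem.List.pyRange_one, List.foldl_map]
  have hn : ((l.length : Int) - 1 - 0).toNat = l.length - 1 := by omega
  have hf : (fun (st : Int × Int) (k : Nat) =>
        solStep st (PySem.List.pyGetD l (0 + (k : Int)) 0) (PySem.List.pyGetD l (0 + (k : Int) + 1) 0))
      = fun st k => solStep st (l.getD k 0) (l.getD (k + 1) 0) := by
    funext st k
    rw [show (0 : Int) + (k : Int) = ((k : Nat) : Int) by omega,
        show ((k : Nat) : Int) + 1 = (((k + 1 : Nat)) : Int) by omega,
        PySem.List.pyGetD_natCast, PySem.List.pyGetD_natCast]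
  rw [hn, hf, ← map_adjacent_pairs l, List.foldl_map]

-- count of elements whose successor is in l
def succCount (l : List Int) : Int := (l.countP (fun a => decide (a + 1 ∈ l)) : Int)

lemma succCount_cons_of_ge (x : Int) (t : List Int) (ht : ∀ a ∈ t, x ≤ a) :
    succCount (x :: t) = (if x + 1 ∈ t then 1 else 0) + succCount t := by
  unfold succCount
  rw [List.countP_cons]
  have hhead : (x + 1 ∈ x :: t) = (x + 1 ∈ t) := by
    simp only [List.mem_cons, eq_iff_iff, or_iff_right_iff_imp]
    intro h; omega
  have hcnt : t.countP (fun a => decide (a + 1 ∈ x :: t)) = t.countP (fun a => decide (a + 1 ∈ t)) := by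
    apply List.countP_congr
    intro a ha
    have hx := ht a ha
    have : (a + 1 ∈ x :: t) = (a + 1 ∈ t) := by
      simp only [List.mem_cons, eq_iff_iff, or_iff_right_iff_imp]
      intro h; omega
    simp [this]
  have hx' : decide (x + 1 ∈ x :: t) = decide (x + 1 ∈ t) := by
    simp only [List.mem_cons, decide_eq_decide]
    constructor
    · rintro (h | h)
      · omega
      · exact h
    · exact Or.inr
  rw [hcnt, hx']
  by_cases hx : x + 1 ∈ t
  · simp [hx]
    omega
  · simp [hx]

-- the scan over adjacent pairs of a sorted list computes succCount, up to the carried state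
lemma scan_sorted (t : List Int) : ∀ (x r s : Int), (x :: t).Pairwise (· ≤ ·) →
    (((x :: t).zip t).foldl (fun st p => solStep st p.1 p.2) (r, s)).1
      = r + (if x + 1 ∈ t then s else 0) + succCount (x :: t) := by
  induction t with
  | nil =>
    intro x r s _
    simp [succCount]
  | cons y t' ih =>
    intro x r s hp
    have hxall : ∀ a ∈ y :: t', x ≤ a := (List.pairwise_cons.mp hp).1
    have hxy : x ≤ y := hxall y (by simp)
    have hpt : (y :: t').Pairwise (· ≤ ·) := (List.pairwise_cons.mp hp).2
    have hyt' : ∀ a ∈ t', y ≤ a := (List.pairwise_cons.mp hpt).1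
    have hcnt : succCount (x :: y :: t')
        = (if x + 1 ∈ y :: t' then 1 else 0) + succCount (y :: t') :=
      succCount_cons_of_ge x (y :: t') hxall
    have hzip : ((x :: y :: t').zip (y :: t')) = (x, y) :: ((y :: t').zip t') := rfl
    rw [hzip, List.foldl_cons]
    by_cases hb : x = y - 1
    · -- boundary: add 1 + soldiers
      have hstep : solStep (r, s) x y = (r + 1 + s, 0) := by simp only [solStep, if_pos hb]
      rw [hstep, ih y (r + 1 + s) 0 hpt]
      have hxt : x + 1 ∈ y :: t' := by simp [show x + 1 = y by omega]
      rw [hcnt]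
      simp only [if_pos hxt, ite_self]
      ring
    · by_cases he : x = y
      · -- equal: soldiers += 1
        have hstep : solStep (r, s) x y = (r, s + 1) := by simp only [solStep, if_neg hb, if_pos he]
        rw [hstep, ih y r (s + 1) hpt]
        rw [hcnt]
        by_cases hy1 : y + 1 ∈ t'
        · have h1 : x + 1 ∈ y :: t' := by rw [he]; exact List.mem_cons_of_mem _ hy1
          simp only [if_pos h1, if_pos hy1]
          ring
        · have h1 : x + 1 ∉ y :: t' := by
            rw [he]
            simp only [List.mem_cons]
            push Not
            exact ⟨by omega, hy1⟩
          simp only [if_neg h1, if_neg hy1]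
          ring
      · -- gap: reset soldiers
        have hstep : solStep (r, s) x y = (r, 0) := by simp only [solStep, if_neg hb, if_neg he]
        rw [hstep, ih y r 0 hpt]
        have hxt : x + 1 ∉ y :: t' := by
          intro h
          rcases List.mem_cons.mp h with h | h
          · omega
          · have := hyt' _ h; omega
        rw [hcnt]
        simp only [if_neg hxt, ite_self]
        ring

lemma solution_eq_succCount (ranks : List Int) :
    solution ranks = (ranks.countP (fun a => decide (a + 1 ∈ ranks)) : Int) := by
  unfold solution
  dsimp only
  rw [fold_pyRange_eq_fold_zip]
  have hperm := PySem.List.sorted_perm ranks (fun x => x) false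
  have hmem : ∀ a : Int, (a ∈ PySem.List.sorted ranks (fun x => x)) ↔ a ∈ ranks := by
    intro a; exact hperm.mem_iff
  cases hs : PySem.List.sorted ranks (fun x => x) with
  | nil =>
    have : ranks = [] := by
      have := hperm
      rw [hs] at this
      exact (List.Perm.nil_eq this).symm
    subst this
    simp
  | cons x t =>
    have hp : (x :: t).Pairwise (· ≤ ·) := by
      have := PySem.List.sorted_pairwise ranks (fun x => x)
      rw [hs] at this
      exact this
    rw [show (x :: t).tail = t from rfl, scan_sorted t x 0 0 hp]
    have hcc : succCount (x :: t) = (ranks.countP (fun a => decide (a + 1 ∈ ranks)) : Int) := by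
      unfold succCount
      have hpred : (x :: t).countP (fun a => decide (a + 1 ∈ x :: t))
          = (x :: t).countP (fun a => decide (a + 1 ∈ ranks)) := by
        apply List.countP_congr
        intro a _
        have := hmem (a + 1)
        rw [hs] at this
        simp [this]
      rw [hpred]
      have hcp : (x :: t).countP (fun a => decide (a + 1 ∈ ranks))
          = ranks.countP (fun a => decide (a + 1 ∈ ranks)) := by
        apply List.Perm.countP_eq
        rw [← hs]; exact hperm
      rw [hcp]
    rw [hcc]
    simp

lemma solution_alt_eq_succCount (ranks : List Int) :
    solution_alt ranks = (ranks.countP (fun a => decide (a + 1 ∈ ranks)) : Int) := by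
  unfold solution_alt
  dsimp only
  rw [PySem.List.sum_map_ite_one_zero]
  congr 1
  apply List.countP_congr
  intro a _
  constructor
  · intro h
    have := (PySem.Set.contains_iff (PySem.Set.ofList ranks) (a + 1)).mp h
    simp [(PySem.Set.mem_ofList ranks (a + 1)).mp this]
  · intro h
    exact (PySem.Set.contains_iff (PySem.Set.ofList ranks) (a + 1)).mpr
      ((PySem.Set.mem_ofList ranks (a + 1)).mpr (by simpa using h))

-- ===== VERDICT (by name: the statement is the Claim_ definition above) =====
theorem solution_spec : Claim_equal_solution := by
  intro ranks _
  unfold Spec_solution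
  rw [solution_eq_succCount, solution_alt_eq_succCount]
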